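-- pv_equiv track=rewrite | github.com/themedworld/agricalcule | main.py | score_rouille_brune
-- ===== SOURCE A (Python) =====
-- def clamp(score):
--     return max(0, min(100, score))
--
-- def score_rouille_brune(hours):
--     score = 0
--     consecutive = 0
--
--     for h in hours[:24]:
--         if 15 <= h["temp"] <= 25 and h["humidity"] >= 85:
--             consecutive += 1
--             score += 5
--             if h["is_wet"]:
--                 score += 3
--         else:
--             consecutive = 0
--
--         if consecutive >= 6:
--             score += 20
--
--     return clamp(score)
-- ===== SOURCE B (Python) =====
-- def clamp(score):
--     return max(0, min(100, score))
--
-- def _flag(h):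
--     q = 15 <= h["temp"] <= 25 and h["humidity"] >= 85
--     return (q, q and bool(h["is_wet"]))
--
-- def score_rouille_brune(hours):
--     flags = [_flag(h) for h in hours[:24]]
--     base = 5 * sum(1 for q, _ in flags if q) + 3 * sum(1 for _, w in flags if w)
--     runs = []
--     cur = 0
--     for q, _ in flags:
--         if q:
--             cur += 1
--         else:
--             if cur:
--                 runs.append(cur)
--             cur = 0
--     if cur:
--         runs.append(cur)
--     bonus = sum(20 * max(0, L - 5) for L in runs)
--     return clamp(base + bonus)
-- ===== Notes on version B (the rewrite author's own statement) =====
-- stated objective: alternative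
-- what changed: Replaces A's single stateful loop (score plus an inline consecutive counter that fires +20 each hour from the 6th onward) by a flag-mapping pass, count-based base score, and a run-length scan that adds 20*max(0,L-5) per maximal qualifying run.
import Mathlib
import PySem

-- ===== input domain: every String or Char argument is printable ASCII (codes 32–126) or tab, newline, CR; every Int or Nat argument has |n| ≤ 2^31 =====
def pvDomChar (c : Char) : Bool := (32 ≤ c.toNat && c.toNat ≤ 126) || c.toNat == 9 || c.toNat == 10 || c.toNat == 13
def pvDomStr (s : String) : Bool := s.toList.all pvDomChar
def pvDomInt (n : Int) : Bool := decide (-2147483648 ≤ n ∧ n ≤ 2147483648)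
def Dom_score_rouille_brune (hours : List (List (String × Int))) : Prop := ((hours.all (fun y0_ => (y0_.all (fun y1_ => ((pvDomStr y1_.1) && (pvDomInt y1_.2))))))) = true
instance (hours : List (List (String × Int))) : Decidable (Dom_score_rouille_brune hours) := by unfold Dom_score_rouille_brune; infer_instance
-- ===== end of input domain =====

-- B replaces A's inline consecutive-counter (+20 per hour from the 6th onward) by a
-- flag/count pass plus a run-length scan adding 20*max(0,L-5) per maximal run; objective: alternative decomposition.

-- dict lookup h[k]: first match in the association list; Pre_ guarantees the key is
-- present wherever the Python evaluates h[k], so the .getD 0 default is never reached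
-- on admitted inputs (KeyError inputs are excluded by Pre_).
def pvGetI (h : List (String × Int)) (k : String) : Int :=
  ((h.find? (fun p => p.1 == k)).map Prod.snd).getD 0

def pvClamp (s : Int) : Int := max 0 (min 100 s)

-- ===== PORT A =====
def score_rouille_brune (hours : List (List (String × Int))) : Int :=
  let r := (PySem.List.slice hours none (some 24)).foldl
    (fun (st : Int × Int) h =>
      let st1 :=
        if 15 ≤ pvGetI h "temp" ∧ pvGetI h "temp" ≤ 25 ∧ 85 ≤ pvGetI h "humidity" then
          (st.1 + 5 + (if pvGetI h "is_wet" ≠ 0 then 3 else 0), st.2 + 1)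
        else (st.1, 0)
      if st1.2 ≥ 6 then (st1.1 + 20, st1.2) else st1)
    (0, 0)
  pvClamp r.1

-- ===== PORT B =====
def pvFlag (h : List (String × Int)) : Bool × Bool :=
  let q := decide (15 ≤ pvGetI h "temp" ∧ pvGetI h "temp" ≤ 25 ∧ 85 ≤ pvGetI h "humidity")
  (q, q && (pvGetI h "is_wet" != 0))

def score_rouille_brune_alt (hours : List (List (String × Int))) : Int :=
  let flags := (PySem.List.slice hours none (some 24)).map pvFlag
  let base : Int := 5 * ((flags.filter (fun p => p.1)).length : Int)
                  + 3 * ((flags.filter (fun p => p.2)).length : Int)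
  let rc := flags.foldl
    (fun (st : List Int × Int) p =>
      if p.1 then (st.1, st.2 + 1)
      else (if st.2 ≠ 0 then st.1 ++ [st.2] else st.1, 0))
    ([], 0)
  let runs := if rc.2 ≠ 0 then rc.1 ++ [rc.2] else rc.1
  let bonus := (runs.map (fun L => 20 * max 0 (L - 5))).sum
  pvClamp (base + bonus)

-- ===== PRECONDITION & SPEC =====
-- Pre_ excludes exactly the inputs on which the Python raises KeyError: among the first
-- 24 hours, "temp" must be present; "humidity" whenever temp is in [15,25]; "is_wet"
-- whenever additionally humidity ≥ 85 (Python's short-circuit evaluation order).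
def pvHourOK (h : List (String × Int)) : Bool :=
  match (h.find? (fun p => p.1 == "temp")).map Prod.snd with
  | none => false
  | some t =>
    if 15 ≤ t ∧ t ≤ 25 then
      match (h.find? (fun p => p.1 == "humidity")).map Prod.snd with
      | none => false
      | some hu =>
        if 85 ≤ hu then (h.find? (fun p => p.1 == "is_wet")).isSome else true
    else true

def Pre_score_rouille_brune (hours : List (List (String × Int))) : Prop :=
  (PySem.List.slice hours none (some 24)).all pvHourOK = true
instance (hours : List (List (String × Int))) : Decidable (Pre_score_rouille_brune hours) := by
  unfold Pre_score_rouille_brune; infer_instance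

def pvWitness_score_rouille_brune : (List (List (String × Int))) :=
  [[("temp", 20), ("humidity", 90), ("is_wet", 1)], [("temp", 5)]]

def Spec_score_rouille_brune (hours : List (List (String × Int))) (out : Int) : Prop := out = score_rouille_brune_alt hours
instance (hours : List (List (String × Int))) (out : Int) : Decidable (Spec_score_rouille_brune hours out) := by unfold Spec_score_rouille_brune; infer_instance

-- ===== CLAIM (what is proved, stated in full; the proofs are below) =====
def Claim_equal_score_rouille_brune : Prop := ∀ (hours : List (List (String × Int))), Dom_score_rouille_brune hours → Pre_score_rouille_brune hours → Spec_score_rouille_brune hours (score_rouille_brune hours)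

-- ===== LEMMAS AND PROOFS =====

-- A's loop step on the flag pair (the +20 folded into the arithmetic; in the else
-- branch the counter is 0, so A's second `if` never fires there)
def aStep (st : Int × Int) (p : Bool × Bool) : Int × Int :=
  if p.1 then
    (st.1 + 5 + (if p.2 then 3 else 0) + (if st.2 + 1 ≥ 6 then 20 else 0), st.2 + 1)
  else (st.1, 0)

-- B's bonus, in recursive form: bonus of the runs of fs given a current open run of length c
def gBonus : List (Bool × Bool) → Int → Int
  | [], c => 20 * max 0 (c - 5)
  | p :: rest, c => if p.1 then gBonus rest (c + 1) else 20 * max 0 (c - 5) + gBonus rest 0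

theorem aStep_eq_flag (st : Int × Int) (h : List (String × Int)) :
    (let st1 := if 15 ≤ pvGetI h "temp" ∧ pvGetI h "temp" ≤ 25 ∧ 85 ≤ pvGetI h "humidity" then
        (st.1 + 5 + (if pvGetI h "is_wet" ≠ 0 then 3 else 0), st.2 + 1)
      else (st.1, 0)
     if st1.2 ≥ 6 then (st1.1 + 20, st1.2) else st1) = aStep st (pvFlag h) := by
  simp only [pvFlag, aStep]
  by_cases hq : 15 ≤ pvGetI h "temp" ∧ pvGetI h "temp" ≤ 25 ∧ 85 ≤ pvGetI h "humidity"
  · by_cases h6 : st.2 + 1 ≥ 6 <;> simp [hq, h6, bne_iff_ne]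
  · have : ¬ ((0:Int) ≥ 6) := by omega
    simp [hq, this]

-- B's run-collecting fold, summarized by gBonus
theorem bonus_fold (fs : List (Bool × Bool)) (rs : List Int) (c : Int) :
    (let rc := fs.foldl
        (fun (st : List Int × Int) p =>
          if p.1 then (st.1, st.2 + 1)
          else (if st.2 ≠ 0 then st.1 ++ [st.2] else st.1, 0)) (rs, c)
     ((if rc.2 ≠ 0 then rc.1 ++ [rc.2] else rc.1).map (fun L => 20 * max 0 (L - 5))).sum)
    = (rs.map (fun L => 20 * max 0 (L - 5))).sum + gBonus fs c := by
  induction fs generalizing rs c with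
  | nil =>
    simp only [List.foldl_nil, gBonus]
    by_cases hc : c = 0
    · simp [hc]
    · simp [hc]
  | cons p rest ih =>
    simp only [List.foldl_cons]
    by_cases hp : p.1 = true
    · simp only [hp, if_true, gBonus]
      exact ih rs (c + 1)
    · simp only [hp, if_false, Bool.false_eq_true, gBonus]
      rw [ih]
      by_cases hc : c = 0
      · simp [hc]
      · simp [hc, add_assoc]

-- main invariant: A's fold over flags equals base-counts plus gBonus, correcting for the
-- bonus already paid for the open run of length c
theorem main_inv (fs : List (Bool × Bool)) (hqw : ∀ p ∈ fs, p.2 = true → p.1 = true)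
    (s c : Int) (hc : 0 ≤ c) :
    (fs.foldl aStep (s, c)).1
      = s + 5 * ((fs.filter (fun p => p.1)).length : Int)
          + 3 * ((fs.filter (fun p => p.2)).length : Int)
          + gBonus fs c - 20 * max 0 (c - 5) := by
  induction fs generalizing s c with
  | nil => simp [gBonus]
  | cons p rest ih =>
    have hqw' : ∀ q ∈ rest, q.2 = true → q.1 = true :=
      fun q hq => hqw q (List.mem_cons_of_mem _ hq)
    by_cases hp : p.1 = true
    · simp only [List.foldl_cons, aStep, hp, if_true]
      rw [ih hqw' _ _ (by omega)]
      by_cases hw : p.2 = true <;> by_cases h6 : c + 1 ≥ 6 <;>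
        simp [gBonus, hp, hw, h6] <;> omega
    · have hw : p.2 ≠ true := fun h => hp (hqw p List.mem_cons_self h)
      simp only [List.foldl_cons, aStep, hp, if_false, Bool.false_eq_true]
      rw [ih hqw' _ _ le_rfl]
      simp [gBonus, hp, hw]
      omega

theorem pvFlag_imp (h : List (String × Int)) : (pvFlag h).2 = true → (pvFlag h).1 = true := by
  simp only [pvFlag, Bool.and_eq_true]
  exact fun hw => hw.1

-- ===== VERDICT (by name: the statement is the Claim_ definition above) =====
theorem score_rouille_brune_spec : Claim_equal_score_rouille_brune := by
  intro hours _ _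
  show score_rouille_brune hours = score_rouille_brune_alt hours
  unfold score_rouille_brune score_rouille_brune_alt
  simp only
  set hs := PySem.List.slice hours none (some 24) with hhs
  have hA : hs.foldl
      (fun (st : Int × Int) h =>
        let st1 := if 15 ≤ pvGetI h "temp" ∧ pvGetI h "temp" ≤ 25 ∧ 85 ≤ pvGetI h "humidity" then
            (st.1 + 5 + (if pvGetI h "is_wet" ≠ 0 then 3 else 0), st.2 + 1)
          else (st.1, 0)
        if st1.2 ≥ 6 then (st1.1 + 20, st1.2) else st1) (0, 0)
      = (hs.map pvFlag).foldl aStep (0, 0) := by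
    rw [List.foldl_map]
    apply PySem.List.foldl_congr_mem
    intro acc x _
    exact aStep_eq_flag acc x
  rw [hA]
  have hflag : ∀ p ∈ hs.map pvFlag, p.2 = true → p.1 = true := by
    intro p hp
    rcases List.mem_map.mp hp with ⟨h, _, rfl⟩
    exact pvFlag_imp h
  rw [main_inv (hs.map pvFlag) hflag 0 0 le_rfl]
  rw [bonus_fold (hs.map pvFlag) [] 0]
  have hmax : (max (0:Int) (0 - 5)) = 0 := by omega
  rw [hmax]
  congr 1
  simp
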